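-- pv_equiv track=rewrite | github.com/Vicvargas/RegistroElectores | menoshombres.py | verifica
-- ===== SOURCE A (Python) =====
-- def verifica(men, viejaLista, indice, arch):
--     if arch == "Extranjero":
--             return especial(men, viejaLista, indice, arch, "")
--     elif men == viejaLista[indice][1]:
--         if arch == "Alajuela":
--             return "República de Costa Rica, 07-09-2018, " + arch + ", " + viejaLista[indice][0] + " MATE0, "+ men
--         if arch =="Heredia":
--             return "República de Costa Rica, 07-09-2018, " + arch + ", " + viejaLista[indice][0] + " ISIDRO, "+ men
--         else:
--             return "República de Costa Rica, 07-09-2018, " + arch + ", " + viejaLista[indice][0] + ", "+ men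
--     else:
--         return verifica(men, viejaLista, indice+1, arch)
--
-- def especial(men,viejaLista,indice,arch, result):
--     if indice == len(viejaLista):
--         return "República de Costa Rica, 07-09-2018, " + arch + ", " + result + '1'
--     if viejaLista[indice][1] == '1':
--         if viejaLista[indice][0] == "TRINIDAD":
--             return especial(men, viejaLista, indice+1, arch, result + viejaLista[indice][0] + " Y TOBAGO, ")
--         else:
--             return especial(men, viejaLista, indice+1, arch, result + viejaLista[indice][0] + ", ")
--     else:
--         return especial(men, viejaLista, indice+1, arch, result)
-- ===== SOURCE B (Python) =====
-- def verifica(men, viejaLista, indice, arch):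
--     if arch == "Extranjero":
--         return especial(men, viejaLista, indice, arch, "")
--     i = indice
--     while men != viejaLista[i][1]:
--         i += 1
--     row = viejaLista[i]
--     if arch == "Alajuela":
--         mid = " MATE0"
--     elif arch == "Heredia":
--         mid = " ISIDRO"
--     else:
--         mid = ""
--     return "República de Costa Rica, 07-09-2018, " + arch + ", " + row[0] + mid + ", " + men
--
-- def especial(men, viejaLista, indice, arch, result):
--     parts = []
--     i = indice
--     while i != len(viejaLista):
--         row = viejaLista[i]
--         if row[1] == '1':
--             parts.append(row[0] + (" Y TOBAGO, " if row[0] == "TRINIDAD" else ", "))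
--         i += 1
--     return "República de Costa Rica, 07-09-2018, " + arch + ", " + result + "".join(parts) + "1"
-- ===== Notes on version B (the rewrite author's own statement) =====
-- stated objective: alternative
-- what changed: Both recursions became iterative loops: the search returns on the first matching row with the format string assembled once from a computed middle piece, and especial's string-accumulator recursion is replaced by collecting the parts into a list that is joined at the end.
import Mathlib
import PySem

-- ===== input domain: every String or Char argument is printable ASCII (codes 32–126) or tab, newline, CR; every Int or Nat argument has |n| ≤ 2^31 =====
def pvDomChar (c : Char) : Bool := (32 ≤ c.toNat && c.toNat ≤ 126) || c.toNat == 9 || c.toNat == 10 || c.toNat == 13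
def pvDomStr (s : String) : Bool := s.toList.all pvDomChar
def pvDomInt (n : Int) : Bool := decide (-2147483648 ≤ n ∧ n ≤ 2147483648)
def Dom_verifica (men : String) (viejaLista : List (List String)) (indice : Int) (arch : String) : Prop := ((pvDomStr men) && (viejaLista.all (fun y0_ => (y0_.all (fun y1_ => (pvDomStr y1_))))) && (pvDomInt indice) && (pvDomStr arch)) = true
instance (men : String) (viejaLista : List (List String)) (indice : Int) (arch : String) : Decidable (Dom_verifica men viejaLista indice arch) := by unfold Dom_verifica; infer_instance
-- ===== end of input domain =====

-- B replaces both recursions by iterative loops: the search loop finds the matching index once and the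
-- format string is assembled from a computed middle piece, and `especial`'s string accumulator becomes
-- a list of parts joined at the end. Return values only; where the Python raises (IndexError: no match,
-- out-of-range index, row with < 2 fields) both ports return "" and Pre_ excludes those inputs.
-- Loops are ported with a fuel counter that is sufficient on every input the Python returns on.

-- ===== PORT A =====
-- literal port of A's helper `especial` (accumulator recursion); a `none` from an index access is
-- the Python IndexError: the port returns "" there (and on exhausted fuel), Pre_ excludes those inputs
def especialAGo : Nat → String → List (List String) → Int → String → String → String
  | 0, _, _, _, _, _ => ""
  | fuel + 1, men, viejaLista, indice, arch, result =>
    if indice = (viejaLista.length : Int) then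
      "República de Costa Rica, 07-09-2018, " ++ arch ++ ", " ++ result ++ "1"
    else
      match PySem.List.pyGet? viejaLista indice with
      | none => ""
      | some row =>
        match PySem.List.pyGet? row 1 with
        | none => ""
        | some v =>
          if v = "1" then
            match PySem.List.pyGet? row 0 with
            | none => ""
            | some r0 =>
              if r0 = "TRINIDAD" then
                especialAGo fuel men viejaLista (indice + 1) arch (result ++ r0 ++ " Y TOBAGO, ")
              else
                especialAGo fuel men viejaLista (indice + 1) arch (result ++ r0 ++ ", ")
          else especialAGo fuel men viejaLista (indice + 1) arch result

def especialA (men : String) (viejaLista : List (List String)) (indice : Int) (arch result : String) : String :=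
  especialAGo ((viejaLista.length : Int) - indice + 1).toNat men viejaLista indice arch result

-- literal port of A's recursion on `indice`
def verificaAGo : Nat → String → List (List String) → Int → String → String
  | 0, _, _, _, _ => ""
  | fuel + 1, men, viejaLista, indice, arch =>
    match PySem.List.pyGet? viejaLista indice with
    | none => ""
    | some row =>
      match PySem.List.pyGet? row 1 with
      | none => ""
      | some v =>
        if men = v then
          match PySem.List.pyGet? row 0 with
          | none => ""
          | some r0 =>
            if arch = "Alajuela" then
              "República de Costa Rica, 07-09-2018, " ++ arch ++ ", " ++ r0 ++ " MATE0, " ++ men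
            else if arch = "Heredia" then
              "República de Costa Rica, 07-09-2018, " ++ arch ++ ", " ++ r0 ++ " ISIDRO, " ++ men
            else
              "República de Costa Rica, 07-09-2018, " ++ arch ++ ", " ++ r0 ++ ", " ++ men
        else verificaAGo fuel men viejaLista (indice + 1) arch

def verifica (men : String) (viejaLista : List (List String)) (indice : Int) (arch : String) : String :=
  if arch = "Extranjero" then especialA men viejaLista indice arch ""
  else verificaAGo ((viejaLista.length : Int) - indice + 1).toNat men viejaLista indice arch

-- ===== PORT B =====
-- B's search loop: advance i until men == viejaLista[i][1]; the index found (none = IndexError)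
def findMatchGo : Nat → String → List (List String) → Int → Option Int
  | 0, _, _, _ => none
  | fuel + 1, men, viejaLista, i =>
    match PySem.List.pyGet? viejaLista i with
    | none => none
    | some row =>
      match PySem.List.pyGet? row 1 with
      | none => none
      | some v => if men = v then some i else findMatchGo fuel men viejaLista (i + 1)

-- B's `especial` loop: collect the comma-separated parts into a list (none = an exception in the loop)
def collectPartsGo : Nat → List (List String) → Int → Option (List String)
  | 0, _, _ => none
  | fuel + 1, viejaLista, i =>
    if i = (viejaLista.length : Int) then some []
    else
      match PySem.List.pyGet? viejaLista i with
      | none => none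
      | some row =>
        match PySem.List.pyGet? row 1 with
        | none => none
        | some v =>
          if v = "1" then
            match PySem.List.pyGet? row 0 with
            | none => none
            | some r0 =>
              match collectPartsGo fuel viejaLista (i + 1) with
              | none => none
              | some rest => some ((r0 ++ (if r0 = "TRINIDAD" then " Y TOBAGO, " else ", ")) :: rest)
          else collectPartsGo fuel viejaLista (i + 1)

def especialB (men : String) (viejaLista : List (List String)) (indice : Int) (arch result : String) : String :=
  match collectPartsGo ((viejaLista.length : Int) - indice + 1).toNat viejaLista indice with
  | none => ""
  | some parts =>
    "República de Costa Rica, 07-09-2018, " ++ arch ++ ", " ++ result ++ String.join parts ++ "1"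

def verifica_alt (men : String) (viejaLista : List (List String)) (indice : Int) (arch : String) : String :=
  if arch = "Extranjero" then especialB men viejaLista indice arch ""
  else
    match findMatchGo ((viejaLista.length : Int) - indice + 1).toNat men viejaLista indice with
    | none => ""
    | some j =>
      match PySem.List.pyGet? viejaLista j with
      | none => ""
      | some row =>
        match PySem.List.pyGet? row 0 with
        | none => ""
        | some r0 =>
          let mid := if arch = "Alajuela" then " MATE0" else if arch = "Heredia" then " ISIDRO" else ""
          "República de Costa Rica, 07-09-2018, " ++ arch ++ ", " ++ r0 ++ mid ++ ", " ++ men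

-- ===== PRECONDITION & SPEC =====
-- Pre_ holds exactly where the Python A returns normally: for "Extranjero", `especial` walks indices
-- indice..len-1 (a negative start wraps and visits every row) and each visited row needs ≥ 2 fields;
-- otherwise the search must reach a row whose field [1] equals men, every row visited on the way
-- (Python index semantics, hence pyGetD) having ≥ 2 fields. Outside Pre_ the Python raises
-- IndexError and both ports return "".
def Pre_verifica (men : String) (viejaLista : List (List String)) (indice : Int) (arch : String) : Prop :=
  if arch = "Extranjero" then
    -(viejaLista.length : Int) ≤ indice ∧ indice ≤ (viejaLista.length : Int) ∧
      ∀ row ∈ viejaLista.drop indice.toNat, 2 ≤ row.length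
  else
    ∃ k < 2 * viejaLista.length,
      (∀ m < k + 1, 2 ≤ (PySem.List.pyGetD viejaLista (indice + (m : Int)) []).length) ∧
      men = (PySem.List.pyGetD viejaLista (indice + (k : Int)) []).getD 1 ""
instance (men : String) (viejaLista : List (List String)) (indice : Int) (arch : String) : Decidable (Pre_verifica men viejaLista indice arch) := by unfold Pre_verifica; infer_instance

def pvWitness_verifica : String × List (List String) × Int × String :=
  ("X", [["SAN JOSE", "X"]], 0, "Limon")

def Spec_verifica (men : String) (viejaLista : List (List String)) (indice : Int) (arch : String) (out : String) : Prop := out = verifica_alt men viejaLista indice arch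
instance (men : String) (viejaLista : List (List String)) (indice : Int) (arch : String) (out : String) : Decidable (Spec_verifica men viejaLista indice arch out) := by unfold Spec_verifica; infer_instance

-- ===== CLAIM (what is proved, stated in full; the proofs are below) =====
def Claim_equal_verifica : Prop := ∀ (men : String) (viejaLista : List (List String)) (indice : Int) (arch : String), Dom_verifica men viejaLista indice arch → Pre_verifica men viejaLista indice arch → Spec_verifica men viejaLista indice arch (verifica men viejaLista indice arch)

-- ===== LEMMAS AND PROOFS =====

theorem foldl_append_pull (p : List String) : ∀ a b : String,
    p.foldl (fun r s => r ++ s) (a ++ b) = a ++ p.foldl (fun r s => r ++ s) b := by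
  induction p with
  | nil => simp
  | cons t p ih => intro a b; simp only [List.foldl_cons]; rw [String.append_assoc, ih]

theorem join_cons (s : String) (p : List String) : String.join (s :: p) = s ++ String.join p := by
  simp only [String.join, List.foldl_cons]
  have h : ("" : String) ++ s = s ++ "" := by simp
  rw [h, foldl_append_pull]

-- A's accumulator recursion equals B's collect-then-join, for every fuel, index and accumulator
theorem especialGo_eq (men arch : String) (viejaLista : List (List String)) :
    ∀ (fuel : Nat) (indice : Int) (result : String),
    especialAGo fuel men viejaLista indice arch result =
      (match collectPartsGo fuel viejaLista indice with
       | none => ""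
       | some parts =>
         "República de Costa Rica, 07-09-2018, " ++ arch ++ ", " ++ result ++ String.join parts ++ "1") := by
  intro fuel
  induction fuel with
  | zero => intro i result; rfl
  | succ fuel ih =>
    intro i result
    rw [especialAGo, collectPartsGo]
    by_cases hlen : i = (viejaLista.length : Int)
    · rw [if_pos hlen, if_pos hlen]
      simp [String.join]
    · rw [if_neg hlen, if_neg hlen]
      cases hg : PySem.List.pyGet? viejaLista i with
      | none => rfl
      | some row =>
        dsimp only
        cases hg1 : PySem.List.pyGet? row 1 with
        | none => rfl
        | some v =>
          dsimp only
          by_cases hv : v = "1"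
          · rw [if_pos hv, if_pos hv]
            cases hg0 : PySem.List.pyGet? row 0 with
            | none => rfl
            | some r0 =>
              dsimp only
              by_cases ht : r0 = "TRINIDAD"
              · rw [if_pos ht, ih (i + 1)]
                cases hc : collectPartsGo fuel viejaLista (i + 1) with
                | none => rfl
                | some rest => simp [ht, join_cons, String.append_assoc]
              · rw [if_neg ht, ih (i + 1)]
                cases hc : collectPartsGo fuel viejaLista (i + 1) with
                | none => rfl
                | some rest => simp [ht, join_cons, String.append_assoc]
          · rw [if_neg hv, if_neg hv, ih (i + 1)]

-- A's match-and-format recursion equals B's find-the-index-then-format-once, for every fuel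
theorem verificaGo_eq (men arch : String) (viejaLista : List (List String)) :
    ∀ (fuel : Nat) (indice : Int),
    verificaAGo fuel men viejaLista indice arch =
      (match findMatchGo fuel men viejaLista indice with
       | none => ""
       | some j =>
         match PySem.List.pyGet? viejaLista j with
         | none => ""
         | some row =>
           match PySem.List.pyGet? row 0 with
           | none => ""
           | some r0 =>
             let mid := if arch = "Alajuela" then " MATE0" else if arch = "Heredia" then " ISIDRO" else ""
             "República de Costa Rica, 07-09-2018, " ++ arch ++ ", " ++ r0 ++ mid ++ ", " ++ men) := by
  intro fuel
  induction fuel with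
  | zero => intro i; rfl
  | succ fuel ih =>
    intro i
    rw [verificaAGo, findMatchGo]
    cases hg : PySem.List.pyGet? viejaLista i with
    | none => rfl
    | some row =>
      dsimp only
      cases hg1 : PySem.List.pyGet? row 1 with
      | none => rfl
      | some v =>
        dsimp only
        by_cases hm : men = v
        · rw [if_pos hm, if_pos hm]
          dsimp only
          rw [hg]
          dsimp only
          cases hg0 : PySem.List.pyGet? row 0 with
          | none => rfl
          | some r0 =>
            dsimp only
            by_cases ha : arch = "Alajuela"
            · subst ha
              rw [if_pos rfl, if_pos rfl]
              simp only [String.append_assoc]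
              rw [show (" MATE0" : String) ++ (", " ++ men) = " MATE0" ++ ", " ++ men from
                (String.append_assoc ..).symm]
              rfl
            · by_cases hh : arch = "Heredia"
              · subst hh
                rw [if_neg (show ¬("Heredia" : String) = "Alajuela" by decide),
                  if_neg (show ¬("Heredia" : String) = "Alajuela" by decide),
                  if_pos rfl, if_pos rfl]
                simp only [String.append_assoc]
                rw [show (" ISIDRO" : String) ++ (", " ++ men) = " ISIDRO" ++ ", " ++ men from
                  (String.append_assoc ..).symm]
                rfl
              · rw [if_neg ha, if_neg hh, if_neg ha, if_neg hh]
                simp [String.append_assoc]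
        · rw [if_neg hm, if_neg hm, ih (i + 1)]

-- ===== VERDICT (by name: the statement is the Claim_ definition above) =====
theorem verifica_spec : Claim_equal_verifica := by
  intro men viejaLista indice arch _ _
  unfold Spec_verifica verifica verifica_alt
  by_cases h : arch = "Extranjero"
  · rw [if_pos h, if_pos h]
    unfold especialA especialB
    exact especialGo_eq men arch viejaLista _ indice ""
  · rw [if_neg h, if_neg h]
    exact verificaGo_eq men arch viejaLista _ indice
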